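-- pv_equiv track=rewrite | github.com/Bashar3/ddmin-algorithm | ddmin_alg/ddmin.py | removeChunckAndMergeRest
-- ===== SOURCE A (Python) =====
-- import itertools as iters
--
-- def removeChunckAndMergeRest(a_list):
--     removedChunck = []
--     list_of_tuples_combinations = list(iters.combinations(a_list, len(a_list) - 1))
--     list_of_lists_combinations = [list(elem) for elem in list_of_tuples_combinations]
--
--     for elem in list_of_lists_combinations:
--         joinSublists = list(iters.chain.from_iterable(elem))
--         removedChunck.append(joinSublists)
--
--     return removedChunck
-- ===== SOURCE B (Python) =====
-- def removeChunckAndMergeRest(a_list):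
--     n = len(a_list)
--     pre = [[]]
--     acc = []
--     for xs in a_list:
--         acc = acc + xs
--         pre.append(acc)
--     suf = [[]]
--     acc = []
--     for xs in reversed(a_list):
--         acc = xs + acc
--         suf.append(acc)
--     suf.reverse()
--     return [pre[i] + suf[i + 1] for i in reversed(range(n))]
-- ===== Notes on version B (the rewrite author's own statement) =====
-- stated objective: alternative
-- what changed: Replaces materializing all (n-1)-combinations and flattening each from scratch with one forward prefix-flatten pass and one backward suffix-flatten pass, each output row being pre[i] + suf[i+1]; same output order (omitted index descending) and same overall cost, since the output itself has size Theta(n*total).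
-- outside the precondition, e.g. on removeChunckAndMergeRest([]): A raises ValueError, B returns []
import Mathlib
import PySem

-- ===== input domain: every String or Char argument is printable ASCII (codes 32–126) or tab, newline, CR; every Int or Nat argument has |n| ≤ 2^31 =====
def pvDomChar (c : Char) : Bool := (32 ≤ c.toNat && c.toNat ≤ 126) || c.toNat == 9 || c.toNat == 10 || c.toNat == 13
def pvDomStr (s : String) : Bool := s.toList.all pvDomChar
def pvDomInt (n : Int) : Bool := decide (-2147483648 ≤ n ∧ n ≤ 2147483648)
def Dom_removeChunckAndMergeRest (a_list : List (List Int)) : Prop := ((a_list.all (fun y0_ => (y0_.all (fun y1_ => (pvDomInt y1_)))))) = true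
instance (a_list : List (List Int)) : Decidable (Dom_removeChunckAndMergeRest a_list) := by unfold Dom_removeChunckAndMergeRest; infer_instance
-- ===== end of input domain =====

-- B replaces materializing all (n-1)-combinations with one prefix pass and one suffix pass;
-- equivalence proved on nonempty lists (A raises ValueError on []).


-- ===== PORT A =====
-- itertools.combinations(xs, r) for lists, in itertools' lexicographic order
def pvComb : List (List Int) → Nat → List (List (List Int))
  | _, 0 => [[]]
  | [], _ + 1 => []
  | x :: rest, r + 1 => (pvComb rest r).map (fun c => x :: c) ++ pvComb rest (r + 1)

def removeChunckAndMergeRest (a_list : List (List Int)) : List (List Int) :=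
  let list_of_lists_combinations := pvComb a_list (a_list.length - 1)
  list_of_lists_combinations.foldl (fun removedChunck elem => removedChunck ++ [elem.flatten]) []

-- ===== PORT B =====
def removeChunckAndMergeRest_alt (a_list : List (List Int)) : List (List Int) :=
  let n := a_list.length
  let p := a_list.foldl
    (fun (st : List (List Int) × List Int) xs => (st.1 ++ [st.2 ++ xs], st.2 ++ xs)) ([[]], [])
  let pre := p.1
  let s := a_list.reverse.foldl
    (fun (st : List (List Int) × List Int) xs => (st.1 ++ [xs ++ st.2], xs ++ st.2)) ([[]], [])
  let suf := s.1.reverse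
  (List.range n).reverse.map (fun i => pre.getD i [] ++ suf.getD (i + 1) [])

-- ===== PRECONDITION & SPEC =====
-- A raises ValueError on the empty list (combinations with r = -1); Pre_ excludes exactly that input.
def Pre_removeChunckAndMergeRest (a_list : List (List Int)) : Prop := a_list ≠ []
instance (a_list : List (List Int)) : Decidable (Pre_removeChunckAndMergeRest a_list) := by unfold Pre_removeChunckAndMergeRest; infer_instance
def pvWitness_removeChunckAndMergeRest : List (List Int) := [[1, 2], [3], []]

def Spec_removeChunckAndMergeRest (a_list : List (List Int)) (out : List (List Int)) : Prop := out = removeChunckAndMergeRest_alt a_list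
instance (a_list : List (List Int)) (out : List (List Int)) : Decidable (Spec_removeChunckAndMergeRest a_list out) := by unfold Spec_removeChunckAndMergeRest; infer_instance

-- ===== CLAIM (what is proved, stated in full; the proofs are below) =====
def Claim_equal_removeChunckAndMergeRest : Prop := ∀ (a_list : List (List Int)), Dom_removeChunckAndMergeRest a_list → Pre_removeChunckAndMergeRest a_list → Spec_removeChunckAndMergeRest a_list (removeChunckAndMergeRest a_list)

-- ===== LEMMAS AND PROOFS =====

lemma pvComb_big : ∀ (xs : List (List Int)) (r : Nat), xs.length < r → pvComb xs r = [] := by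
  intro xs
  induction xs with
  | nil => intro r h; cases r with
    | zero => omega
    | succ r => rfl
  | cons x rest ih =>
    intro r h
    cases r with
    | zero => omega
    | succ r =>
      simp only [pvComb, ih r (by simpa using Nat.lt_of_succ_lt_succ h),
        ih (r + 1) (by simp at h ⊢; omega), List.map_nil, List.append_nil]

lemma pvComb_full : ∀ (xs : List (List Int)), pvComb xs xs.length = [xs] := by
  intro xs
  induction xs with
  | nil => rfl
  | cons x rest ih =>
    simp only [List.length_cons, pvComb, ih, pvComb_big rest (rest.length + 1) (by omega),
      List.map_cons, List.map_nil, List.append_nil]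

lemma pvComb_omit : ∀ (rest : List (List Int)) (x : List Int),
    pvComb (x :: rest) rest.length
      = (List.range (rest.length + 1)).reverse.map (fun i => (x :: rest).eraseIdx i) := by
  intro rest
  induction rest with
  | nil => intro x; rfl
  | cons y t ih =>
    intro x
    have h2 : pvComb (y :: t) (t.length + 1) = [y :: t] := pvComb_full (y :: t)
    have step : pvComb (x :: y :: t) (t.length + 1)
        = (pvComb (y :: t) t.length).map (fun c => x :: c) ++ pvComb (y :: t) (t.length + 1) := rfl
    rw [List.length_cons, step, ih y, h2, List.range_succ_eq_map (n := t.length + 1)]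
    simp [List.map_map, Function.comp_def]

lemma foldl_push (l : List (List (List Int))) : ∀ acc : List (List Int),
    l.foldl (fun acc elem => acc ++ [elem.flatten]) acc = acc ++ l.map List.flatten := by
  induction l with
  | nil => simp
  | cons x t ih => intro acc; simp [ih, List.append_assoc]

-- characterization of A on nonempty lists
lemma A_char (x : List Int) (rest : List (List Int)) :
    removeChunckAndMergeRest (x :: rest)
      = (List.range (x :: rest).length).reverse.map (fun i => ((x :: rest).eraseIdx i).flatten) := by
  show (pvComb (x :: rest) ((x :: rest).length - 1)).foldl _ [] = _
  simp only [List.length_cons, Nat.add_sub_cancel]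
  rw [pvComb_omit rest x, foldl_push, List.nil_append, List.map_map]
  rfl

-- prefix-fold invariant
lemma pre_inv (l : List (List Int)) : ∀ (pres : List (List Int)) (acc : List Int),
    l.foldl (fun (st : List (List Int) × List Int) xs => (st.1 ++ [st.2 ++ xs], st.2 ++ xs)) (pres, acc)
      = (pres ++ (List.range l.length).map (fun i => acc ++ (l.take (i + 1)).flatten), acc ++ l.flatten) := by
  induction l with
  | nil => intro pres acc; simp
  | cons x t ih =>
    intro pres acc
    simp only [List.foldl_cons, ih, List.length_cons]
    rw [List.range_succ_eq_map]
    simp [List.map_map, Function.comp, List.append_assoc]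

lemma pre_char (l : List (List Int)) :
    (l.foldl (fun (st : List (List Int) × List Int) xs => (st.1 ++ [st.2 ++ xs], st.2 ++ xs)) ([[]], [])).1
      = (List.range (l.length + 1)).map (fun i => (l.take i).flatten) := by
  rw [pre_inv, List.range_succ_eq_map]
  simp [List.map_map, Function.comp]

-- suffix-fold characterization
lemma suf_char : ∀ (l : List (List Int)),
    (l.reverse.foldl (fun (st : List (List Int) × List Int) xs => (st.1 ++ [xs ++ st.2], xs ++ st.2)) ([[]], []))
      = (((List.range (l.length + 1)).map (fun j => (l.drop j).flatten)).reverse, l.flatten) := by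
  intro l
  induction l with
  | nil => simp
  | cons x t ih =>
    simp only [List.reverse_cons, List.foldl_append, ih, List.foldl_cons, List.foldl_nil,
      List.length_cons]
    rw [Prod.mk.injEq]
    refine ⟨?_, by simp⟩
    rw [List.range_succ_eq_map (n := t.length + 1)]
    simp [List.map_map, Function.comp_def]

lemma getD_map_range (h : Nat → List Int) (m i : Nat) (hi : i < m) :
    ((List.range m).map h).getD i [] = h i := by
  simp [List.getD, hi]

-- characterization of B
lemma B_char (l : List (List Int)) :
    removeChunckAndMergeRest_alt l
      = (List.range l.length).reverse.map
          (fun i => (l.take i).flatten ++ (l.drop (i + 1)).flatten) := by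
  show (List.range l.length).reverse.map _ = _
  apply List.map_congr_left
  intro i hi
  have hi' : i < l.length := by simpa using hi
  rw [pre_char, suf_char]
  simp only [List.reverse_reverse]
  rw [getD_map_range _ _ _ (by omega), getD_map_range _ _ _ (by omega)]

-- ===== VERDICT (by name: the statement is the Claim_ definition above) =====
theorem removeChunckAndMergeRest_spec : Claim_equal_removeChunckAndMergeRest := by
  intro a_list _ hpre
  unfold Spec_removeChunckAndMergeRest
  cases a_list with
  | nil => exact absurd rfl hpre
  | cons x rest =>
    rw [A_char, B_char]
    apply List.map_congr_left
    intro i _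
    rw [List.eraseIdx_eq_take_drop_succ, List.flatten_append]
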